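-- pv_equiv track=rewrite | github.com/chriskd/memex | src/memex/parser/chunking.py | _trim_span
-- ===== SOURCE A (Python) =====
-- def _trim_span(content: str, start: int, end: int) -> tuple[str, int, int] | None:
--     while start < end and content[start].isspace():
--         start += 1
--     while end > start and content[end - 1].isspace():
--         end -= 1
--     if start >= end:
--         return None
--     return content[start:end], start, end
-- ===== SOURCE B (Python) =====
-- def _trim_span(content: str, start: int, end: int) -> "tuple[str, int, int] | None":
--     segment = content[start:end]
--     stripped = segment.strip()
--     if not stripped:
--         return None
--     new_start = start + (len(segment) - len(segment.lstrip()))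
--     return stripped, new_start, new_start + len(stripped)
-- ===== Notes on version B (the rewrite author's own statement) =====
-- stated objective: simpler
-- what changed: B slices the span once and uses str.strip()/str.lstrip(), recovering the new indices by length arithmetic, instead of A's two character-by-character index-walking while-loops; Pre_ excludes spans with a negative or past-the-end endpoint (except spans empty both numerically and after clamping), where A raises IndexError or mixes per-character wraparound indexing with slice semantics while B applies Python slice clamping.
-- outside the precondition, e.g. on _trim_span('ab', -1, 2): A returns ('b', -1, 2), B returns ('b', -1, 0); on _trim_span('a ', 0, -1): A returns None, B returns ('a', 0, 1)
import Mathlib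
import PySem

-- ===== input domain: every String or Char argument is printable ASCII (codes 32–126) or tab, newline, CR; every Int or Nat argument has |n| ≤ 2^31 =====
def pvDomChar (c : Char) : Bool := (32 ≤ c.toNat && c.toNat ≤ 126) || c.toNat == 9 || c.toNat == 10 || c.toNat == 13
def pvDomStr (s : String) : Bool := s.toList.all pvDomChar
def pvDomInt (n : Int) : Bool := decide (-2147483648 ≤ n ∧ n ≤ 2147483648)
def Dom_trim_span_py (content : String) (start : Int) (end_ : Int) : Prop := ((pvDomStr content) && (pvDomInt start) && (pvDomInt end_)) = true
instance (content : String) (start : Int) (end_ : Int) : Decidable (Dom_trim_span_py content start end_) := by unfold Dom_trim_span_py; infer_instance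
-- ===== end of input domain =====

-- B computes the trimmed span by one slice + strip/lstrip and length arithmetic instead of A's
-- two index-walking whitespace loops (objective: simpler). Pre_ excludes spans with negative or
-- out-of-range endpoints (unless the span is already empty both ways), where A raises IndexError
-- or mixes per-character wraparound indexing with slice semantics — a corner no caller specifies.


-- ===== PORT A =====
-- while start < end and content[start].isspace(): start += 1
def aTrimL (s : List Char) (start : Int) (end_ : Int) : Int :=
  if h : start < end_ then
    match PySem.List.pyGet? s start with
    | some c => if PySem.Chars.isspace c then aTrimL s (start + 1) end_ else start
    | none => start          -- Python raises IndexError here; excluded by Pre_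
  else start
termination_by (end_ - start).toNat
decreasing_by omega

-- while end > start and content[end - 1].isspace(): end -= 1
def aTrimR (s : List Char) (start : Int) (end_ : Int) : Int :=
  if h : start < end_ then
    match PySem.List.pyGet? s (end_ - 1) with
    | some c => if PySem.Chars.isspace c then aTrimR s start (end_ - 1) else end_
    | none => end_           -- Python raises IndexError here; excluded by Pre_
  else end_
termination_by (end_ - start).toNat
decreasing_by omega

def trim_span_py (content : String) (start : Int) (end_ : Int) : Option (String × Int × Int) :=
  let s := content.toList
  let start1 := aTrimL s start end_
  let end1 := aTrimR s start1 end_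
  if start1 ≥ end1 then none
  else some (String.ofList (PySem.List.slice s (some start1) (some end1)), start1, end1)

-- ===== PORT B =====
def trim_span_py_alt (content : String) (start : Int) (end_ : Int) : Option (String × Int × Int) :=
  let segment := PySem.List.slice content.toList (some start) (some end_)
  let stripped := PySem.Chars.strip segment
  if stripped.isEmpty then none
  else
    let new_start := start + ((segment.length : Int) - ((PySem.Chars.lstrip segment).length : Int))
    some (String.ofList stripped, new_start, new_start + (stripped.length : Int))

-- ===== PRECONDITION & SPEC =====
-- Pre_ excludes spans with a negative or past-the-end endpoint (except spans that are empty both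
-- numerically and after clamping): there A raises IndexError or returns a value mixing wraparound
-- indexing with slicing, while B applies Python slice clamping — an unspecified corner.
def Pre_trim_span_py (content : String) (start : Int) (end_ : Int) : Prop :=
  (0 ≤ start ∧ 0 ≤ end_ ∧ (end_ ≤ (content.toList.length : Int) ∨ end_ ≤ start)) ∨
  (end_ ≤ start ∧ PySem.List.clampIdx content.toList.length end_ ≤ PySem.List.clampIdx content.toList.length start)
instance (content : String) (start : Int) (end_ : Int) : Decidable (Pre_trim_span_py content start end_) := by unfold Pre_trim_span_py; infer_instance
def pvWitness_trim_span_py : String × Int × Int := ("  a ", 0, 4)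

def Spec_trim_span_py (content : String) (start : Int) (end_ : Int) (out : Option (String × Int × Int)) : Prop := out = trim_span_py_alt content start end_
instance (content : String) (start : Int) (end_ : Int) (out : Option (String × Int × Int)) : Decidable (Spec_trim_span_py content start end_ out) := by unfold Spec_trim_span_py; infer_instance

-- ===== CLAIM (what is proved, stated in full; the proofs are below) =====
def Claim_equal_trim_span_py : Prop := ∀ (content : String) (start : Int) (end_ : Int), Dom_trim_span_py content start end_ → Pre_trim_span_py content start end_ → Spec_trim_span_py content start end_ (trim_span_py content start end_)
-- ===== LEMMAS AND PROOFS =====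

-- dropWhile as a drop (not found by exact?; derived from takeWhile_append_dropWhile + drop_left)
theorem dropWhile_eq_drop_len {α : Type} (p : α → Bool) (xs : List α) :
    xs.dropWhile p = xs.drop (xs.takeWhile p).length := by
  nth_rewrite 3 [← List.takeWhile_append_dropWhile (p := p) (l := xs)]
  rw [List.drop_left]

theorem rstrip_append_space (xs : List Char) (c : Char) (h : PySem.Chars.isspace c = true) :
    PySem.Chars.rstrip (xs ++ [c]) = PySem.Chars.rstrip xs := by
  simp [PySem.Chars.rstrip, h]

theorem rstrip_append_nonspace (xs : List Char) (c : Char) (h : PySem.Chars.isspace c = false) :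
    PySem.Chars.rstrip (xs ++ [c]) = xs ++ [c] := by
  simp [PySem.Chars.rstrip, h]

-- rstrip is a prefix: rstrip xs = xs.take (rstrip xs).length
theorem rstrip_prefix (xs : List Char) : PySem.Chars.rstrip xs <+: xs := by
  have := (List.dropWhile_suffix (l := xs.reverse) PySem.Chars.isspace).reverse
  simpa [PySem.Chars.rstrip] using this

-- the left loop lands at a + (leading-space count of the span s[a:b])
theorem aTrimL_eq (s : List Char) (a b : Nat) (hab : a ≤ b) (hb : b ≤ s.length) :
    aTrimL s (a : Int) (b : Int) =
      ((a + (((s.drop a).take (b - a)).takeWhile PySem.Chars.isspace).length : Nat) : Int) := by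
  induction hn : b - a generalizing a with
  | zero =>
      have hba : a = b := by omega
      rw [aTrimL]
      simp [hba]
  | succ n ih =>
      have hlt : a < b := by omega
      have ha : a < s.length := by omega
      rw [aTrimL]
      rw [dif_pos (by exact_mod_cast hlt)]
      rw [PySem.List.pyGet?_natCast, List.getElem?_eq_getElem ha]
      have hdrop : s.drop a = s[a] :: s.drop (a + 1) :=
        (List.drop_eq_getElem_cons ha)
      rw [hdrop]
      by_cases hc : PySem.Chars.isspace s[a] = true
      · simp only [hc, if_true]
        have h1 : ((a : Int) + 1) = ((a + 1 : Nat) : Int) := by push_cast; ring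
        rw [h1, ih (a + 1) (by omega) (by omega)]
        rw [List.take_succ_cons, List.takeWhile_cons_of_pos hc]
        simp only [List.length_cons]
        push_cast
        ring
      · simp only [hc, if_false]
        rw [List.take_succ_cons, List.takeWhile_cons_of_neg (by simp [hc])]
        simp
  
-- the right loop lands at a + length of rstrip of the span s[a:b]
theorem aTrimR_eq (s : List Char) (a b : Nat) (hab : a ≤ b) (hb : b ≤ s.length) :
    aTrimR s (a : Int) (b : Int) =
      ((a + (PySem.Chars.rstrip ((s.drop a).take (b - a))).length : Nat) : Int) := by
  induction hn : b - a generalizing b with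
  | zero =>
      have hba : a = b := by omega
      rw [aTrimR]
      simp [hba, PySem.Chars.rstrip]
  | succ n ih =>
      have hlt : a < b := by omega
      have hb1 : b - 1 < s.length := by omega
      rw [aTrimR]
      rw [dif_pos (by exact_mod_cast hlt)]
      have hidx : ((b : Int) - 1) = ((b - 1 : Nat) : Int) := by omega
      rw [hidx, PySem.List.pyGet?_natCast, List.getElem?_eq_getElem hb1]
      have h2 : n < (s.drop a).length := by simp; omega
      have hix : a + n = b - 1 := by omega
      have hseg : (s.drop a).take (n + 1) = (s.drop a).take n ++ [s[b-1]] := by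
        rw [List.take_succ_eq_append_getElem h2, List.getElem_drop]; simp only [hix]
      by_cases hc : PySem.Chars.isspace s[b-1] = true
      · simp only [hc, if_true]
        rw [ih (b - 1) (by omega) (by omega) (by omega)]
        rw [hseg, rstrip_append_space _ _ hc]
      · simp only [hc, if_false]
        rw [hseg, rstrip_append_nonspace _ _ (by simp [hc])]
        have hlen : ((s.drop a).take n).length = n := by simp; omega
        simp [hlen]
        omega

-- empty strip: simp-level fact
theorem strip_nil : PySem.Chars.strip [] = [] := by decide

-- main equivalence on the in-range, non-empty-span case
theorem main_case (content : String) (a b : Nat) (hab : a < b) (hb : b ≤ content.toList.length) :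
    trim_span_py content (a : Int) (b : Int) = trim_span_py_alt content (a : Int) (b : Int) := by
  set s : List Char := content.toList with hsdef
  set seg : List Char := (s.drop a).take (b - a) with hsegdef
  have hseglen : seg.length = b - a := by simp [hsegdef]; omega
  set L : Nat := (seg.takeWhile PySem.Chars.isspace).length with hLdef
  have hL : L ≤ b - a := by
    have := (List.takeWhile_prefix (l := seg) PySem.Chars.isspace).length_le
    omega
  have hlstrip : PySem.Chars.lstrip seg = (s.drop (a + L)).take (b - a - L) := by
    rw [PySem.Chars.lstrip, dropWhile_eq_drop_len, ← hLdef, hsegdef,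
        List.drop_take, List.drop_drop]
  have hlstriplen : (PySem.Chars.lstrip seg).length = b - a - L := by
    rw [hlstrip]; simp; omega
  set m : Nat := (PySem.Chars.strip seg).length with hmdef
  have hmle : m ≤ b - a - L := by
    have h1 := (rstrip_prefix (PySem.Chars.lstrip seg)).length_le
    rw [← PySem.Chars.strip] at h1
    omega
  have hstrip_take : PySem.Chars.strip seg = (s.drop (a + L)).take m := by
    have h2 : PySem.Chars.strip seg = (PySem.Chars.lstrip seg).take m := by
      rw [hmdef, PySem.Chars.strip]
      exact List.prefix_iff_eq_take.mp (rstrip_prefix _)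
    rw [h2, hlstrip, List.take_take, min_eq_left hmle]
  have hstart1 : aTrimL s (a : Int) (b : Int) = ((a + L : Nat) : Int) := by
    rw [aTrimL_eq s a b (by omega) hb, ← hsegdef, ← hLdef]
  have hend1 : aTrimR s ((a + L : Nat) : Int) (b : Int) = ((a + L + m : Nat) : Int) := by
    rw [aTrimR_eq s (a + L) b (by omega) hb]
    have h3 : (s.drop (a + L)).take (b - (a + L)) = PySem.Chars.lstrip seg := by
      rw [hlstrip]; congr 1; omega
    rw [h3, ← PySem.Chars.strip, ← hmdef]
  have hBslice : PySem.List.slice content.toList (some (a : Int)) (some (b : Int)) = seg := by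
    rw [← hsdef, PySem.List.slice_natCast, ← hsegdef]
  have hAs : trim_span_py content (a : Int) (b : Int) =
      (if ((a + L : Nat) : Int) ≥ ((a + L + m : Nat) : Int) then none
       else some (String.ofList (PySem.List.slice s (some ((a + L : Nat) : Int)) (some ((a + L + m : Nat) : Int))),
                  ((a + L : Nat) : Int), ((a + L + m : Nat) : Int))) := by
    simp only [trim_span_py, ← hsdef, hstart1, hend1]
  by_cases hst : PySem.Chars.strip seg = []
  · -- all-whitespace (or empty) segment: both return None
    have hm0 : m = 0 := by simp [hmdef, hst]
    rw [hAs, if_pos (by omega)]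
    simp only [trim_span_py_alt, hBslice, hst, List.isEmpty_nil, if_true]
  · have hm0 : 0 < m := by
      rcases Nat.eq_zero_or_pos m with h | h
      · exact absurd (List.eq_nil_of_length_eq_zero (hmdef ▸ h)) hst
      · exact h
    rw [hAs, if_neg (by push_cast; omega)]
    have hslice2 : PySem.List.slice s (some ((a + L : Nat) : Int)) (some ((a + L + m : Nat) : Int)) =
        PySem.Chars.strip seg := by
      have h4 : ((a + L + m : Nat) : Int) = ((a + L : Nat) : Int) + ((m : Nat) : Int) := by push_cast; ring
      rw [h4, PySem.List.slice_natCast_add, hstrip_take]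
    rw [hslice2]
    simp only [trim_span_py_alt, hBslice]
    have hnsB : (a : Int) + ((seg.length : Int) - ((PySem.Chars.lstrip seg).length : Int)) = ((a + L : Nat) : Int) := by
      rw [hseglen, hlstriplen]; push_cast; omega
    rw [hnsB, ← hmdef]
    have hne2 : ((a + L : Nat) : Int) + (m : Int) = ((a + L + m : Nat) : Int) := by push_cast; ring
    rw [hne2]
    simp [List.isEmpty_iff, hst]

-- the span-empty case: A returns None directly, B's clamped slice is empty
theorem empty_case (content : String) (start end_ : Int) (hse : end_ ≤ start)
    (hcl : PySem.List.clampIdx content.toList.length end_ ≤ PySem.List.clampIdx content.toList.length start) :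
    trim_span_py content start end_ = trim_span_py_alt content start end_ := by
  have h1 : aTrimL content.toList start end_ = start := by
    rw [aTrimL, dif_neg (by omega)]
  have h2 : aTrimR content.toList start end_ = end_ := by
    rw [aTrimR, dif_neg (by omega)]
  have hA : trim_span_py content start end_ = none := by
    simp only [trim_span_py, h1, h2]
    rw [if_pos (by omega)]
  have hslice : PySem.List.slice content.toList (some start) (some end_) = [] := by
    apply List.eq_nil_of_length_eq_zero
    rw [PySem.List.length_slice]
    omega
  have hB : trim_span_py_alt content start end_ = none := by
    simp only [trim_span_py_alt, hslice, strip_nil, List.isEmpty_nil, if_true]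
  rw [hA, hB]

-- ===== VERDICT (by name: the statement is the Claim_ definition above) =====
theorem trim_span_py_spec : Claim_equal_trim_span_py := by
  intro content start end_ _hdom hpre
  unfold Spec_trim_span_py
  have hlen : (0 : Int) ≤ (content.toList.length : Int) := by positivity
  by_cases hse : end_ ≤ start
  · apply empty_case content start end_ hse
    rcases hpre with ⟨h0, h0', _⟩ | ⟨_, hcl⟩
    · simp only [PySem.List.clampIdx, if_neg (not_lt.mpr h0'), if_neg (not_lt.mpr h0)]
      exact min_le_min_right _ (Int.toNat_le_toNat hse)
    · exact hcl
  · have hlt : start < end_ := by omega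
    have hP : 0 ≤ start ∧ 0 ≤ end_ ∧ end_ ≤ (content.toList.length : Int) := by
      rcases hpre with ⟨h0, h0', h3 | h3⟩ | ⟨h4, _⟩ <;> first | exact ⟨h0, h0', h3⟩ | omega
    obtain ⟨h0, h0', h3⟩ := hP
    have hs : start = ((start.toNat : Nat) : Int) := by omega
    have he : end_ = ((end_.toNat : Nat) : Int) := by omega
    rw [hs, he]
    exact main_case content start.toNat end_.toNat (by omega) (by omega)
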